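-- pv_equiv track=rewrite | github.com/Ferrari25/ParserASDPpy | Automatas.py | automata_puntoComa
-- ===== SOURCE A (Python) =====
-- ESTADO_FINAL = "ESTADO FINAL"
--
-- ESTADO_NO_FINAL = "NO ACEPTADO"
--
-- ESTADO_TRAMPA = "EN ESTADO TRAMPA"
--
-- def automata_puntoComa(lexema):
--         estadoactual=0
--         estadosfinales=[1]
--         for vcarac in lexema:
--             if estadoactual==0 and vcarac==';':
--                 estadoactual=1
--             else:
--                 estadoactual=-1
--                 break
--         if estadoactual==-1:
--             return ESTADO_TRAMPA
--         if estadoactual in estadosfinales: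
--              return ESTADO_FINAL
--         else:
--              return ESTADO_NO_FINAL
-- ===== SOURCE B (Python) =====
-- ESTADO_FINAL = "ESTADO FINAL"
--
-- ESTADO_NO_FINAL = "NO ACEPTADO"
--
-- ESTADO_TRAMPA = "EN ESTADO TRAMPA"
--
-- def automata_puntoComa(lexema):
--     # decide by shape instead of simulating the automaton
--     chars = list(lexema)
--     if not chars:
--         return ESTADO_NO_FINAL
--     if chars == [';']:
--         return ESTADO_FINAL
--     return ESTADO_TRAMPA
-- ===== Notes on version B (the rewrite author's own statement) =====
-- stated objective: simpler
-- what changed: Replaces the per-character state-machine loop with trap/break logic by a direct shape test: empty input is NO ACEPTADO, exactly [';'] is ESTADO FINAL, anything else is EN ESTADO TRAMPA.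
import Mathlib
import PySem

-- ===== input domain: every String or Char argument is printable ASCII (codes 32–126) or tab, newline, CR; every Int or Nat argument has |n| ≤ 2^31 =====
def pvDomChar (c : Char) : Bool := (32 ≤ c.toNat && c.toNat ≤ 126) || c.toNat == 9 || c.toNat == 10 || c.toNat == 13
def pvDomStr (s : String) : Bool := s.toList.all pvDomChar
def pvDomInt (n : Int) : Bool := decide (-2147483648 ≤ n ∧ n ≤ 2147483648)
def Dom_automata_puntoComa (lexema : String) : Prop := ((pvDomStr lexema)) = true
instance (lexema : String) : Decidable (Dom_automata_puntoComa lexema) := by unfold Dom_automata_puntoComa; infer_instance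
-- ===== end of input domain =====

-- B replaces A's per-character state-machine loop by a direct shape test (simpler).

-- ===== PORT A =====
-- the for-loop with break: threads estadoactual; -1 both sets the state and breaks
def pvLoopA : List Char → Int → Int
  | [], st => st
  | c :: rest, st => if st = 0 ∧ c = ';' then pvLoopA rest 1 else -1

def automata_puntoComa (lexema : String) : String :=
  let estadoactual := pvLoopA lexema.toList 0
  let estadosfinales : List Int := [1]
  if estadoactual = -1 then "EN ESTADO TRAMPA"
  else if estadoactual ∈ estadosfinales then "ESTADO FINAL"
  else "NO ACEPTADO"

-- ===== PORT B =====
def automata_puntoComa_alt (lexema : String) : String :=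
  let chars := lexema.toList
  if chars = [] then "NO ACEPTADO"
  else if chars = [';'] then "ESTADO FINAL"
  else "EN ESTADO TRAMPA"

-- ===== PRECONDITION & SPEC =====
def Spec_automata_puntoComa (lexema : String) (out : String) : Prop := out = automata_puntoComa_alt lexema
instance (lexema : String) (out : String) : Decidable (Spec_automata_puntoComa lexema out) := by unfold Spec_automata_puntoComa; infer_instance

-- ===== CLAIM (what is proved, stated in full; the proofs are below) =====
def Claim_equal_automata_puntoComa : Prop := ∀ (lexema : String), Dom_automata_puntoComa lexema → Spec_automata_puntoComa lexema (automata_puntoComa lexema)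

-- ===== LEMMAS AND PROOFS =====
-- strings of length ≥ 2 always drive A's loop into the trap state
theorem pvLoopA_long (c d : Char) (t : List Char) : pvLoopA (c :: d :: t) 0 = -1 := by
  by_cases h : c = ';' <;> simp [pvLoopA, h]

-- ===== VERDICT (by name: the statement is the Claim_ definition above) =====
theorem automata_puntoComa_spec : Claim_equal_automata_puntoComa := by
  intro lexema _
  unfold Spec_automata_puntoComa automata_puntoComa automata_puntoComa_alt
  rcases hl : lexema.toList with _ | ⟨c, _ | ⟨d, t⟩⟩
  · simp [pvLoopA]
  · by_cases h : c = ';' <;> simp [pvLoopA, h]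
  · simp [pvLoopA_long]
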